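-- pv_equiv track=rewrite | github.com/ahmed0z/Cursor_Preset_Comparison_Tool | matching_engine.py | _extract_multipliers
-- ===== SOURCE A (Python) =====
-- from typing import List, Dict, Tuple, Optional, Any
--
-- def _extract_multipliers(values: List[str]) -> Dict[str, Any]:
--     """Extract multiplier patterns (m, k, n, etc.) from values."""
--     multipliers = {
--         'm': 0, 'k': 0, 'n': 0, 'u': 0, 'p': 0, 'f': 0,
--         'M': 0, 'K': 0, 'N': 0, 'U': 0, 'P': 0, 'F': 0,
--         'G': 0, 'T': 0, 'g': 0, 't': 0
--     }
--
--     for value in values: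
--         value_str = str(value)
--         # Look for multipliers in the value
--         for mult in multipliers.keys():
--             if mult in value_str:
--                 multipliers[mult] += 1
--
--     return multipliers
-- ===== SOURCE B (Python) =====
-- from collections import Counter
--
-- _MULTIPLIERS = ['m', 'k', 'n', 'u', 'p', 'f',
--                 'M', 'K', 'N', 'U', 'P', 'F',
--                 'G', 'T', 'g', 't']
--
-- def _extract_multipliers(values):
--     """Extract multiplier patterns (m, k, n, etc.) from values."""
--     counts = Counter()
--     for value in values:
--         counts.update(set(str(value)))
--     return {m: counts.get(m, 0) for m in _MULTIPLIERS}
-- ===== Notes on version B (the rewrite author's own statement) =====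
-- stated objective: idiomatic
-- what changed: Instead of testing each of the 16 multiplier keys against every value with a nested membership loop, B builds one global character-presence Counter (updating with set(value) so each distinct character counts once per value) and then projects it onto the 16 keys in their original order.
import Mathlib
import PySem

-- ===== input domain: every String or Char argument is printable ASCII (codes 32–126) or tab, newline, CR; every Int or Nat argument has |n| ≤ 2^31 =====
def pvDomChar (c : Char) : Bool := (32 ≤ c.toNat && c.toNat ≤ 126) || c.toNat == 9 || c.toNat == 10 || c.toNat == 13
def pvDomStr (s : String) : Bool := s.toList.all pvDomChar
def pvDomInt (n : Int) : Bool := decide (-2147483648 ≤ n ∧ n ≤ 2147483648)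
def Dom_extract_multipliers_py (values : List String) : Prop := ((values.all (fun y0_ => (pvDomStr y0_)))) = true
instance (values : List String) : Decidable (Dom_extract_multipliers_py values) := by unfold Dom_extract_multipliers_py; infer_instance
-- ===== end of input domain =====

-- B replaces A's nested 16-key membership loop by one global character-presence
-- counter built in a single pass plus a projection onto the 16 keys (idiomatic).


-- ===== PORT A =====
-- the initial dict literal 'multipliers = {...: 0}'
def pvMultInit : PySem.Dict String Int := PySem.Dict.ofList
  [("m", 0), ("k", 0), ("n", 0), ("u", 0), ("p", 0), ("f", 0),
   ("M", 0), ("K", 0), ("N", 0), ("U", 0), ("P", 0), ("F", 0),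
   ("G", 0), ("T", 0), ("g", 0), ("t", 0)]

-- inner loop: 'for mult in multipliers.keys(): if mult in value_str: multipliers[mult] += 1'
def pvAStep (d : PySem.Dict String Int) (value : String) : PySem.Dict String Int :=
  d.keys.foldl (fun d2 mult => if PySem.Str.isIn mult value then d2.modify mult 0 (· + 1) else d2) d

def extract_multipliers_py (values : List String) : List (String × Int) :=
  (values.foldl pvAStep pvMultInit).items

-- ===== PORT B =====
-- the _MULTIPLIERS list (Python 1-char strings, represented as Chars)
def pvMults : List Char := ['m', 'k', 'n', 'u', 'p', 'f',
                            'M', 'K', 'N', 'U', 'P', 'F',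
                            'G', 'T', 'g', 't']

def extract_multipliers_py_alt (values : List String) : List (String × Int) :=
  let counts : PySem.Dict Char Int :=
    values.foldl (fun d value =>
      (PySem.Set.ofList value.toList).foldl (fun d2 c => d2.modify c 0 (· + 1)) d)
      PySem.Dict.empty
  pvMults.map (fun m => (String.ofList [m], counts.getD m 0))

-- ===== PRECONDITION & SPEC =====
def Spec_extract_multipliers_py (values : List String) (out : List (String × Int)) : Prop := out = extract_multipliers_py_alt values
instance (values : List String) (out : List (String × Int)) : Decidable (Spec_extract_multipliers_py values out) := by unfold Spec_extract_multipliers_py; infer_instance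

-- ===== CLAIM (what is proved, stated in full; the proofs are below) =====
def Claim_equal_extract_multipliers_py : Prop := ∀ (values : List String), Dom_extract_multipliers_py values → Spec_extract_multipliers_py values (extract_multipliers_py values)

-- ===== LEMMAS AND PROOFS =====

-- B's counter counts, for each char, the values in which it occurs (once per value)
lemma pvB_counts (values : List String) (d : PySem.Dict Char Int) (c : Char) :
    (values.foldl (fun d value =>
        (PySem.Set.ofList value.toList).foldl (fun d2 ch => d2.modify ch 0 (· + 1)) d) d).getD c 0
      = d.getD c 0 + (values.countP (fun v => decide (c ∈ v.toList)) : Int) := by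
  induction values generalizing d with
  | nil => simp
  | cons v vs ih =>
      rw [List.foldl_cons, ih, PySem.Dict.getD_foldl_modify_add_one]
      rw [List.Nodup.count (PySem.Set.nodup_ofList v.toList)]
      simp only [PySem.Set.mem_ofList, List.countP_cons]
      by_cases h : c ∈ v.toList
      · simp [h]; ring
      · simp [h]

-- membership of a single-char string in a string is char membership
lemma pvIsIn_single (c : Char) (v : String) :
    PySem.Str.isIn (String.ofList [c]) v = decide (c ∈ v.toList) := by
  have key : PySem.Str.isIn (String.ofList [c]) v = true ↔ c ∈ v.toList := by
    rw [PySem.Str.isIn_iff_infix, String.toList_ofList]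
    exact List.singleton_infix_iff c v.toList
  by_cases h : c ∈ v.toList
  · rw [key.mpr h]; simp [h]
  · cases hb : PySem.Str.isIn (String.ofList [c]) v
    · simp [h]
    · exact absurd (key.mp hb) h

-- a Set.update that adds nothing new is the identity
lemma pvSetUpdate_self (s l : List String) (h : ∀ x ∈ l, x ∈ s) :
    PySem.Set.update s l = s := by
  induction l generalizing s with
  | nil => rfl
  | cons x xs ih =>
      have hadd : PySem.Set.add s x = s := by
        simp [PySem.Set.add, PySem.Set.contains, h x (by simp)]
      show PySem.Set.update (PySem.Set.add s x) xs = s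
      rw [hadd]
      exact ih s (fun y hy => h y (by simp [hy]))

-- A's inner loop preserves the key list
lemma pvAStep_keys (d : PySem.Dict String Int) (v : String) :
    (pvAStep d v).keys = d.keys := by
  unfold pvAStep
  rw [PySem.List.foldl_if_eq_foldl_filter, PySem.Dict.keys_foldl_modify]
  exact pvSetUpdate_self _ _ (fun x hx => (List.mem_filter.mp hx).1)

-- A's inner loop, pointwise on an existing key
lemma pvAStep_getD (d : PySem.Dict String Int) (v : String) (hnd : d.keys.Nodup)
    (k : String) (hk : k ∈ d.keys) :
    (pvAStep d v).getD k 0 = d.getD k 0 + (if PySem.Str.isIn k v then 1 else 0) := by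
  unfold pvAStep
  rw [PySem.List.foldl_if_eq_foldl_filter, PySem.Dict.getD_foldl_modify_add_one]
  rw [List.Nodup.count (hnd.filter _)]
  by_cases h : PySem.Str.isIn k v <;> simp [List.mem_filter, hk, h]

-- A's outer loop: keys preserved, each key's value counts the values containing it
lemma pvA_loop (values : List String) (d : PySem.Dict String Int) (hnd : d.keys.Nodup) :
    (values.foldl pvAStep d).keys = d.keys ∧
    ∀ k ∈ d.keys, (values.foldl pvAStep d).getD k 0
      = d.getD k 0 + (values.countP (fun v => PySem.Str.isIn k v) : Int) := by
  induction values generalizing d with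
  | nil => simp
  | cons v vs ih =>
      rw [List.foldl_cons]
      have hk := pvAStep_keys d v
      have hnd' : (pvAStep d v).keys.Nodup := hk ▸ hnd
      obtain ⟨ih1, ih2⟩ := ih (pvAStep d v) hnd'
      refine ⟨by rw [ih1, hk], fun k hmem => ?_⟩
      rw [ih2 k (hk ▸ hmem), pvAStep_getD d v hnd k hmem, List.countP_cons]
      by_cases h : PySem.Str.isIn k v <;> simp [h] <;> ring

-- reconstruct a dict's items from its keys and getD
lemma pvItems_eq (d : PySem.Dict String Int) (K : List String) (f : String → Int)
    (hK : d.keys = K) (hnd : K.Nodup) (hv : ∀ k ∈ K, d.getD k 0 = f k) :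
    d.items = K.map (fun k => (k, f k)) := by
  have hk' : d.items.map Prod.fst = K := by simpa [PySem.Dict.keys] using hK
  have hlen : d.items.length = K.length := by
    simpa using congrArg List.length hk'
  apply List.ext_getElem
  · simpa using hlen
  · intro i h1 h2
    have hiK : i < K.length := by simpa using h2
    have hfst : d.items[i].1 = K[i] := by
      have : (d.items.map Prod.fst)[i]'(by simpa using h1) = K[i] := by
        exact List.getElem_of_eq hk' _
      simpa using this
    have hmem : d.items[i] ∈ d.items := List.getElem_mem _
    have hnd' : d.keys.Nodup := hK ▸ hnd
    have hmem' : (d.items[i].1, d.items[i].2) ∈ d.items := by rw [Prod.mk.eta]; exact hmem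
    have hgd : d.getD d.items[i].1 0 = d.items[i].2 :=
      PySem.Dict.getD_of_mem_items d hmem' hnd' 0
    have hsnd : d.items[i].2 = f K[i] := by
      rw [← hv K[i] (List.getElem_mem _), ← hfst, hgd]
    simp only [List.getElem_map]
    exact Prod.ext hfst hsnd

-- ===== VERDICT (by name: the statement is the Claim_ definition above) =====
theorem extract_multipliers_py_spec : Claim_equal_extract_multipliers_py := by
  intro values _
  show extract_multipliers_py values = extract_multipliers_py_alt values
  unfold extract_multipliers_py extract_multipliers_py_alt
  have hkeys : pvMultInit.keys = pvMults.map (fun c => String.ofList [c]) := by decide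
  have hnd : (pvMults.map (fun c => String.ofList [c])).Nodup := by decide
  obtain ⟨h1, h2⟩ := pvA_loop values pvMultInit (by rw [hkeys]; exact hnd)
  rw [hkeys] at h1 h2
  rw [pvItems_eq _ (pvMults.map (fun c => String.ofList [c]))
        (fun k => (values.countP (fun v => PySem.Str.isIn k v) : Int))
        h1 hnd
        (fun k hk => by
          rw [h2 k hk]
          have h0 : pvMultInit.getD k 0 = 0 := by
            fin_cases hk <;> decide
          rw [h0, zero_add])]
  rw [List.map_map]
  apply List.map_congr_left
  intro c hc
  simp only [Function.comp]
  rw [pvB_counts, PySem.Dict.getD_empty, zero_add]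
  congr 2
  apply List.countP_congr
  intro v hv
  rw [pvIsIn_single]
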